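-- pv_equiv track=rewrite | github.com/nomadkaraoke/python-lyrics-transcriber | analyze_corrections/analyze_corrections.py | split_preserve_whitespace
-- ===== SOURCE A (Python) =====
-- from typing import Dict, List
--
-- def split_preserve_whitespace(text: str) -> List[tuple[str, str]]:
--     """Split text into words and whitespace while preserving both."""
--     parts = []
--     current_word = []
--     current_whitespace = []
--
--     for char in text:
--         if char.isspace():
--             if current_word:
--                 parts.append(("word", "".join(current_word)))
--                 current_word = []
--             current_whitespace.append(char)
--         else:
--             if current_whitespace:
--                 parts.append(("space", "".join(current_whitespace)))
--                 current_whitespace = []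
--             current_word.append(char)
--
--     if current_word:
--         parts.append(("word", "".join(current_word)))
--     if current_whitespace:
--         parts.append(("space", "".join(current_whitespace)))
--
--     return parts
-- ===== SOURCE B (Python) =====
-- def split_preserve_whitespace(text: str):
--     """Split text into words and whitespace while preserving both.
--
--     Run-based scan: take one maximal same-class run at a time (no
--     per-character buffers or flush-on-transition state machine)."""
--     parts = []
--     i, n = 0, len(text)
--     while i < n:
--         is_space = text[i].isspace()
--         j = i + 1
--         while j < n and text[j].isspace() == is_space:
--             j += 1
--         parts.append(("space" if is_space else "word", text[i:j]))
--         i = j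
--     return parts
-- ===== Notes on version B (the rewrite author's own statement) =====
-- stated objective: simpler
-- what changed: Replaces A's per-character state machine with two pending buffers and flush-on-transition logic by a run-at-a-time scan that slices each maximal same-class run directly.
import Mathlib
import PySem

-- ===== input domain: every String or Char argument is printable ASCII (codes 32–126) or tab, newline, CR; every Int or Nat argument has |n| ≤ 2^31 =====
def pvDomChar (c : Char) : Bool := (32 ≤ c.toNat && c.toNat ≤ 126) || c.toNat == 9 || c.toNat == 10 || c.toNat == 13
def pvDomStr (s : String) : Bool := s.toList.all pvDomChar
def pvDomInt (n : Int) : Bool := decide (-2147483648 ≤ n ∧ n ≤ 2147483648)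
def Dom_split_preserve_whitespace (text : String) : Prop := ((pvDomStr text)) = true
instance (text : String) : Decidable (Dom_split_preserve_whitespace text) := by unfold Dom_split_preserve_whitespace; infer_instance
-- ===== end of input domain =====

-- B replaces A's two-buffer flush-on-transition state machine by a run-at-a-time scan (objective: simpler).

-- ===== PORT A =====
-- state = (parts, current_word, current_whitespace)
def pvStepA (st : List (String × String) × List Char × List Char) (ch : Char) :
    List (String × String) × List Char × List Char :=
  let (parts, w, s) := st
  if PySem.Chars.isspace ch then
    let parts := if w ≠ [] then parts ++ [("word", String.ofList w)] else parts
    (parts, [], s ++ [ch])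
  else
    let parts := if s ≠ [] then parts ++ [("space", String.ofList s)] else parts
    (parts, w ++ [ch], [])

def pvFinishA (st : List (String × String) × List Char × List Char) : List (String × String) :=
  let (parts, w, s) := st
  let parts := if w ≠ [] then parts ++ [("word", String.ofList w)] else parts
  if s ≠ [] then parts ++ [("space", String.ofList s)] else parts

def split_preserve_whitespace (text : String) : List (String × String) :=
  pvFinishA (text.toList.foldl pvStepA ([], [], []))

-- ===== PORT B =====
-- one maximal same-class run per step (text[i:j] = head run)
def pvRunsB : List Char → List (String × String)
  | [] => []
  | c :: cs =>
    let b := PySem.Chars.isspace c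
    let run := c :: cs.takeWhile (fun x => PySem.Chars.isspace x == b)
    let rest := cs.dropWhile (fun x => PySem.Chars.isspace x == b)
    ((if b then "space" else "word"), String.ofList run) :: pvRunsB rest
termination_by l => l.length
decreasing_by
  simp only [List.length_cons]
  exact Nat.lt_succ_of_le (List.length_dropWhile_le _ _)

def split_preserve_whitespace_alt (text : String) : List (String × String) :=
  pvRunsB text.toList

-- ===== PRECONDITION & SPEC =====
def Spec_split_preserve_whitespace (text : String) (out : List (String × String)) : Prop := out = split_preserve_whitespace_alt text
instance (text : String) (out : List (String × String)) : Decidable (Spec_split_preserve_whitespace text out) := by unfold Spec_split_preserve_whitespace; infer_instance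

-- ===== CLAIM (what is proved, stated in full; the proofs are below) =====
def Claim_equal_split_preserve_whitespace : Prop := ∀ (text : String), Dom_split_preserve_whitespace text → Spec_split_preserve_whitespace text (split_preserve_whitespace text)

-- ===== LEMMAS AND PROOFS =====

-- A's state with exactly one nonempty buffer, selected by class b
def pvMk (parts : List (String × String)) (b : Bool) (buf : List Char) :
    List (String × String) × List Char × List Char :=
  if b then (parts, [], buf) else (parts, buf, [])

lemma pvRunsB_nil : pvRunsB [] = [] := by rw [pvRunsB.eq_def]

def pvLbl (b : Bool) : String := if b then "space" else "word"

lemma pvRunsB_cons (c : Char) (cs : List Char) :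
    pvRunsB (c :: cs) =
      (pvLbl (PySem.Chars.isspace c),
        String.ofList (c :: cs.takeWhile (fun x => PySem.Chars.isspace x == PySem.Chars.isspace c)))
        :: pvRunsB (cs.dropWhile (fun x => PySem.Chars.isspace x == PySem.Chars.isspace c)) := by
  rw [pvRunsB.eq_def]; rfl

lemma pvStepA_match (parts : List (String × String)) (b : Bool) (buf : List Char)
    (c : Char) (hc : PySem.Chars.isspace c = b) :
    pvStepA (pvMk parts b buf) c = pvMk parts b (buf ++ [c]) := by
  cases b <;> simp [pvMk, pvStepA, hc]

lemma pvStepA_switch (parts : List (String × String)) (b : Bool) (buf : List Char)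
    (hbuf : buf ≠ []) (c : Char) (hc : PySem.Chars.isspace c = !b) :
    pvStepA (pvMk parts b buf) c =
      pvMk (parts ++ [(pvLbl b, String.ofList buf)]) (!b) [c] := by
  cases b <;> simp_all [pvMk, pvStepA, pvLbl]

lemma pvFinishA_mk (parts : List (String × String)) (b : Bool) (buf : List Char)
    (hbuf : buf ≠ []) :
    pvFinishA (pvMk parts b buf) = parts ++ [(pvLbl b, String.ofList buf)] := by
  cases b <;> simp_all [pvMk, pvFinishA, pvLbl]

-- main invariant: folding A from a one-buffer state equals B's run decomposition
lemma pvMain : ∀ (l : List Char) (parts : List (String × String)) (b : Bool)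
    (buf : List Char), buf ≠ [] →
    pvFinishA (l.foldl pvStepA (pvMk parts b buf)) =
      parts ++ (pvLbl b, String.ofList (buf ++ l.takeWhile (fun x => PySem.Chars.isspace x == b)))
        :: pvRunsB (l.dropWhile (fun x => PySem.Chars.isspace x == b))
  | [], parts, b, buf, hbuf => by
      simp [pvFinishA_mk parts b buf hbuf, pvRunsB_nil]
  | c :: cs, parts, b, buf, hbuf => by
      by_cases hc : PySem.Chars.isspace c = b
      · rw [List.foldl_cons, pvStepA_match parts b buf c hc,
          pvMain cs parts b (buf ++ [c]) (by simp)]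
        simp [hc, List.takeWhile, List.dropWhile]
      · have hc' : PySem.Chars.isspace c = !b := by
          cases b <;> simp_all
        rw [List.foldl_cons, pvStepA_switch parts b buf hbuf c hc',
          pvMain cs (parts ++ [(pvLbl b, String.ofList buf)]) (!b) [c] (by simp)]
        have hc2 : (PySem.Chars.isspace c == b) = false := by simp [hc]
        simp only [List.takeWhile, List.dropWhile, hc2]
        rw [pvRunsB_cons c cs]
        simp [hc', pvLbl]
termination_by l => l.length
decreasing_by all_goals simp

lemma pvStart (c : Char) :
    pvStepA ([], [], []) c = pvMk [] (PySem.Chars.isspace c) [c] := by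
  by_cases hc : PySem.Chars.isspace c <;> simp [pvStepA, pvMk, hc]

-- ===== VERDICT (by name: the statement is the Claim_ definition above) =====
theorem split_preserve_whitespace_spec : Claim_equal_split_preserve_whitespace := by
  intro text _
  show _ = _
  unfold split_preserve_whitespace split_preserve_whitespace_alt
  cases hl : text.toList with
  | nil => simp [pvFinishA, pvRunsB_nil]
  | cons c cs =>
      rw [List.foldl_cons, pvStart c, pvMain cs [] (PySem.Chars.isspace c) [c] (by simp),
        pvRunsB_cons c cs]
      simp
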